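-- pv_equiv track=rewrite | github.com/RathodDeven/price-updater | scripts/core/normalization_fallbacks.py | collapse_matrix_to_single_row
-- ===== SOURCE A (Python) =====
-- def collapse_matrix_to_single_row(matrix: list[list[str]]) -> list[str] | None:
--     """Join non-empty column fragments across rows into a synthetic row."""
--     if not matrix:
--         return None
--
--     max_cols = max((len(row) for row in matrix), default=0)
--     if max_cols == 0:
--         return None
--
--     non_empty_counts = [sum(1 for cell in row if cell and cell.strip()) for row in matrix]
--     sparse_rows = sum(1 for c in non_empty_counts if c <= 1)
--     if len(matrix) < 4 or sparse_rows < 2: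
--         return None
--
--     chunks: list[list[str]] = [[] for _ in range(max_cols)]
--     for row in matrix:
--         for idx in range(max_cols):
--             cell = row[idx] if idx < len(row) else ""
--             if cell and cell.strip():
--                 chunks[idx].append(cell.strip())
--
--     non_empty_cols = sum(1 for col in chunks if col)
--     if non_empty_cols < 2:
--         return None
--
--     collapsed = ["\n".join(col) if col else "" for col in chunks]
--     if collapsed in matrix:
--         return None
--     return collapsed
-- ===== SOURCE B (Python) =====
-- def collapse_matrix_to_single_row(matrix: list[list[str]]) -> list[str] | None:
--     """Single streaming pass: a running list of joined column strings is grown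
--     and extended row by row (no chunks table, no separate counting passes)."""
--     if not matrix:
--         return None
--
--     acc: list[str] = []   # acc[i] = "\n"-join of column i's fragments seen so far
--     sparse = 0
--     for row in matrix:
--         if len(row) > len(acc):
--             acc.extend([""] * (len(row) - len(acc)))
--         nonblank = 0
--         for idx, cell in enumerate(row):
--             frag = cell.strip()
--             if frag:
--                 nonblank += 1
--                 acc[idx] = acc[idx] + "\n" + frag if acc[idx] else frag
--         if nonblank <= 1:
--             sparse += 1
--
--     if not acc:
--         return None
--     if len(matrix) < 4 or sparse < 2:
--         return None
--     if sum(1 for s in acc if s) < 2: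
--         return None
--     if acc in matrix:
--         return None
--     return acc
-- ===== Notes on version B (the rewrite author's own statement) =====
-- stated objective: alternative
-- what changed: B is a single streaming pass: a running list of already-joined column strings is grown/extended row by row with an in-place string-concat accumulator and the sparse-row count maintained in the same pass, instead of A's staged passes (max-width pass, per-row counting pass, nested chunks-table fill, then count and join passes).
import Mathlib
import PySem

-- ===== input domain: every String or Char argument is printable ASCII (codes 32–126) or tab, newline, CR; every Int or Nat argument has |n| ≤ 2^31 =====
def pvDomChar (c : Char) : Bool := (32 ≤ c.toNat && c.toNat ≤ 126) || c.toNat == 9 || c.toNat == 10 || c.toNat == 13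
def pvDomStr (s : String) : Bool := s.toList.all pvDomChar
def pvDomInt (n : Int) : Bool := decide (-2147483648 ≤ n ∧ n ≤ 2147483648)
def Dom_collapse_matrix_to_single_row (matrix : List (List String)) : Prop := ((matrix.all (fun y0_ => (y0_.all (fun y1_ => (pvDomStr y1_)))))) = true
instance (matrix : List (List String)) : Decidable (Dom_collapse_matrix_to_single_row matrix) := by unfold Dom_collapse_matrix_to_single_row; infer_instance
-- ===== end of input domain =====

-- B replaces A's staged passes (max-width, per-row counts, chunks-table fill, count, join) with ONE streaming
-- pass that grows a running list of already-joined column strings and the sparse count (objective: alternative).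

-- ===== PORT A =====
-- literal port of A: row-major fold filling a chunks table via modify;
-- range(max_cols) ported as List.range (max_cols ≥ 0); row[idx] if idx < len(row) else "" is row.getD idx ""
def collapse_matrix_to_single_row (matrix : List (List String)) : Option (List String) :=
  if matrix = [] then none else
  let max_cols := (PySem.List.max? (matrix.map (fun row => row.length)) (fun x => x)).getD 0
  if max_cols = 0 then none else
  let non_empty_counts := matrix.map (fun row => (row.filter (fun cell => (cell != "") && (PySem.Str.strip cell != ""))).length)
  let sparse_rows := (non_empty_counts.filter (fun c => c ≤ 1)).length
  if matrix.length < 4 ∨ sparse_rows < 2 then none else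
  let chunks := matrix.foldl
    (fun chunks row =>
      (List.range max_cols).foldl
        (fun chunks idx =>
          let cell := row.getD idx ""
          if (cell != "") && (PySem.Str.strip cell != "") then
            chunks.modify idx (fun col => col ++ [PySem.Str.strip cell])
          else chunks)
        chunks)
    (List.replicate max_cols ([] : List String))
  let non_empty_cols := (chunks.filter (fun col => col != [])).length
  if non_empty_cols < 2 then none else
  let collapsed := chunks.map (fun col => if col != [] then PySem.Str.join "\n" col else "")
  if matrix.contains collapsed then none else some collapsed

-- ===== PORT B =====
-- one Python cell: frag = cell.strip(); if frag: nonblank += 1; acc[idx] = acc[idx] + "\n" + frag if acc[idx] else frag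
-- (the enumerate index is ≥ 0 and < len(acc), so .toNat / getD "" / List.set are exact here)
def pvCellStep (p : List String × Nat) (ic : Int × String) : List String × Nat :=
  let frag := PySem.Str.strip ic.2
  if frag != "" then
    (p.1.set ic.1.toNat
       (if p.1.getD ic.1.toNat "" != "" then p.1.getD ic.1.toNat "" ++ "\n" ++ frag else frag),
     p.2 + 1)
  else p

-- one Python row: extend acc with "" up to len(row), inner enumerate loop, sparse update
def pvRowStep (st : List String × Nat) (row : List String) : List String × Nat :=
  let acc := if row.length > st.1.length then st.1 ++ List.replicate (row.length - st.1.length) "" else st.1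
  let p := (PySem.List.enumerate row).foldl pvCellStep (acc, 0)
  (p.1, if p.2 ≤ 1 then st.2 + 1 else st.2)

def collapse_matrix_to_single_row_alt (matrix : List (List String)) : Option (List String) :=
  if matrix = [] then none else
  let st := matrix.foldl pvRowStep (([] : List String), (0 : Nat))
  if st.1 = [] then none else
  if matrix.length < 4 ∨ st.2 < 2 then none else
  if (st.1.filter (fun s => s != "")).length < 2 then none else
  if matrix.contains st.1 then none else some st.1

-- ===== PRECONDITION & SPEC =====
def Spec_collapse_matrix_to_single_row (matrix : List (List String)) (out : Option (List String)) : Prop := out = collapse_matrix_to_single_row_alt matrix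
instance (matrix : List (List String)) (out : Option (List String)) : Decidable (Spec_collapse_matrix_to_single_row matrix out) := by unfold Spec_collapse_matrix_to_single_row; infer_instance

-- ===== CLAIM (what is proved, stated in full; the proofs are below) =====
def Claim_equal_collapse_matrix_to_single_row : Prop := ∀ (matrix : List (List String)), Dom_collapse_matrix_to_single_row matrix → Spec_collapse_matrix_to_single_row matrix (collapse_matrix_to_single_row matrix)

-- ===== LEMMAS AND PROOFS =====

-- the fragment column j receives from a row (both programs' "cell and cell.strip()" gate)
def pvFragAt (idx : Nat) (row : List String) : Option String :=
  match row[idx]? with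
  | some c => if PySem.Str.strip c != "" then some (PySem.Str.strip c) else none
  | none => none

-- max width, column fragments, sparse-row count of a processed prefix
def pvW (l : List (List String)) : Nat := (l.map List.length).foldl max 0
def pvColF (l : List (List String)) (j : Nat) : List String := l.filterMap (pvFragAt j)
def pvS (l : List (List String)) : Nat :=
  (l.filter (fun row => (row.filter (fun c => PySem.Str.strip c != "")).length ≤ 1)).length

theorem strip_empty : PySem.Str.strip "" = "" := by decide

theorem join_nil_str : PySem.Str.join "\n" [] = "" := by decide

theorem keep_eq (c : String) :
    ((c != "") && (PySem.Str.strip c != "")) = (PySem.Str.strip c != "") := by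
  by_cases hc : c = ""
  · subst hc; simp [strip_empty]
  · simp [hc]

theorem max_cols_eq (x : List String) (t : List (List String)) :
    (PySem.List.max? ((x :: t).map (fun row => row.length)) (fun y => y)).getD 0
      = pvW (x :: t) := by
  unfold pvW
  simp only [List.map_cons, List.foldl_cons, PySem.List.max?_id_cons, Option.getD_some]
  rw [Nat.zero_max]

-- the conditional append of A's inner loop is exactly pvFragAt
theorem frag_append (row : List String) (n : Nat) (col : List String) :
    (if ((row.getD n "") != "") && (PySem.Str.strip (row.getD n "") != "") then
        col ++ [PySem.Str.strip (row.getD n "")] else col)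
      = col ++ (pvFragAt n row).toList := by
  rw [keep_eq]
  by_cases h : n < row.length
  · have hg : row.getD n "" = row[n] := List.getD_eq_getElem row "" h
    have hg? : row[n]? = some row[n] := List.getElem?_eq_getElem h
    unfold pvFragAt
    rw [hg, hg?]
    by_cases hs : PySem.Str.strip row[n] != ""
    · simp [hs]
    · simp at hs
      simp [hs]
  · have hg : row.getD n "" = "" := List.getD_eq_default row "" (by omega)
    have hg? : row[n]? = none := List.getElem?_eq_none (by omega)
    unfold pvFragAt
    rw [hg, hg?]
    simp [strip_empty]

theorem frag_toList (row : List String) (n : Nat) :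
    (pvFragAt n row).toList =
      if ((row.getD n "") != "") && (PySem.Str.strip (row.getD n "") != "") then
        [PySem.Str.strip (row.getD n "")] else [] := by
  have h := frag_append row n []
  simp only [List.nil_append] at h
  rw [← h]

theorem inner_len (row : List String) (n : Nat) (chunks : List (List String)) :
    ((List.range n).foldl
        (fun chunks idx =>
          let cell := row.getD idx ""
          if (cell != "") && (PySem.Str.strip cell != "") then
            chunks.modify idx (fun col => col ++ [PySem.Str.strip cell])
          else chunks)
        chunks).length = chunks.length := by
  induction n generalizing chunks with
  | zero => rfl
  | succ m ih =>
    rw [List.range_succ, List.foldl_append, List.foldl_cons, List.foldl_nil]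
    simp only []
    split
    · rw [List.length_modify, ih]
    · rw [ih]

theorem inner_get? (row : List String) (n : Nat) (chunks : List (List String)) (j : Nat) :
    ((List.range n).foldl
        (fun chunks idx =>
          let cell := row.getD idx ""
          if (cell != "") && (PySem.Str.strip cell != "") then
            chunks.modify idx (fun col => col ++ [PySem.Str.strip cell])
          else chunks)
        chunks)[j]? =
      if j < n then (chunks[j]?).map (fun col => col ++ (pvFragAt j row).toList)
      else chunks[j]? := by
  induction n generalizing chunks with
  | zero => simp
  | succ m ih =>
    rw [List.range_succ, List.foldl_append, List.foldl_cons, List.foldl_nil]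
    simp only []
    by_cases hjm : j = m
    · subst hjm
      by_cases hk : ((row.getD j "") != "") && (PySem.Str.strip (row.getD j "") != "")
      · rw [if_pos hk, List.getElem?_modify, ih, if_neg (by omega), if_pos (by omega)]
        have hk' : ¬ row[j]?.getD "" = "" ∧ ¬ PySem.Str.strip (row[j]?.getD "") = "" := by
          simpa using hk
        cases chunks[j]? <;> simp [frag_toList, hk'.1, hk'.2]
      · rw [if_neg hk, ih, if_neg (by omega), if_pos (by omega)]
        have hk' : ¬ row[j]?.getD "" = "" → PySem.Str.strip (row[j]?.getD "") = "" := by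
          simpa using hk
        cases chunks[j]? with
        | none => simp
        | some col =>
          simp only [Option.map_some, frag_toList]
          simp
          exact hk'
    · have hmj : ¬ m = j := fun h => hjm h.symm
      by_cases hk : ((row.getD m "") != "") && (PySem.Str.strip (row.getD m "") != "")
      · rw [if_pos hk, List.getElem?_modify, ih]
        by_cases hjn : j < m
        · rw [if_pos hjn, if_pos (by omega)]
          cases chunks[j]? <;> simp [hmj]
        · rw [if_neg hjn, if_neg (by omega)]
          cases chunks[j]? <;> simp [hmj]
      · rw [if_neg hk, ih]
        by_cases hjn : j < m
        · rw [if_pos hjn, if_pos (by omega)]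
        · rw [if_neg hjn, if_neg (by omega)]

theorem outer_get? (W : Nat) (rows : List (List String)) (chunks : List (List String))
    (h : chunks.length = W) (j : Nat) :
    (rows.foldl
        (fun chunks row =>
          (List.range W).foldl
            (fun chunks idx =>
              let cell := row.getD idx ""
              if (cell != "") && (PySem.Str.strip cell != "") then
                chunks.modify idx (fun col => col ++ [PySem.Str.strip cell])
              else chunks)
            chunks)
        chunks)[j]? =
      (chunks[j]?).map (fun col => col ++ rows.filterMap (pvFragAt j)) := by
  induction rows generalizing chunks with
  | nil =>
    simp only [List.foldl_nil, List.filterMap_nil]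
    cases chunks[j]? <;> simp
  | cons row rest ih =>
    rw [List.foldl_cons]
    rw [ih _ (by rw [inner_len, h])]
    rw [inner_get?]
    by_cases hj : j < W
    · rw [if_pos hj]
      cases hc : chunks[j]? with
      | none => simp
      | some col =>
        simp only [Option.map_some]
        cases hfr : pvFragAt j row <;>
          simp [hfr]
    · rw [if_neg hj]
      have : chunks[j]? = none := List.getElem?_eq_none (by omega)
      rw [this]
      simp

theorem chunks_eq (W : Nat) (matrix : List (List String)) :
    matrix.foldl
        (fun chunks row =>
          (List.range W).foldl
            (fun chunks idx =>
              let cell := row.getD idx ""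
              if (cell != "") && (PySem.Str.strip cell != "") then
                chunks.modify idx (fun col => col ++ [PySem.Str.strip cell])
              else chunks)
            chunks)
        (List.replicate W ([] : List String))
      = (List.range W).map (pvColF matrix) := by
  apply List.ext_getElem?
  intro j
  rw [outer_get? W matrix _ (List.length_replicate) j]
  rw [List.getElem?_replicate]
  by_cases hj : j < W
  · rw [if_pos hj]
    rw [List.getElem?_map, List.getElem?_range hj]
    simp [pvColF]
  · rw [if_neg hj]
    have : (List.range W).length ≤ j := by simp; omega
    rw [List.getElem?_map, List.getElem?_eq_none this]
    simp

theorem sparse_eq (matrix : List (List String)) :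
    ((matrix.map (fun row =>
        (row.filter (fun cell => (cell != "") && (PySem.Str.strip cell != ""))).length)).filter
          (fun c => c ≤ 1)).length
      = pvS matrix := by
  unfold pvS
  rw [List.filter_map, List.length_map]
  apply congrArg List.length
  apply List.filter_congr
  intro row _
  have h : row.filter (fun cell => (cell != "") && (PySem.Str.strip cell != ""))
      = row.filter (fun c => PySem.Str.strip c != "") :=
    List.filter_congr (fun c _ => keep_eq c)
  simp [Function.comp, h]

-- ---- B-side lemmas ----

theorem frag_ne_empty {j : Nat} {row : List String} {f : String}
    (h : pvFragAt j row = some f) : f ≠ "" := by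
  unfold pvFragAt at h
  cases hr : row[j]? with
  | none => rw [hr] at h; simp at h
  | some c =>
    rw [hr] at h
    simp only [] at h
    by_cases hs : (PySem.Str.strip c != "") = true
    · rw [if_pos hs] at h
      cases h; simpa using hs
    · rw [if_neg hs] at h; simp at h

theorem colF_ne_empty (l : List (List String)) (j : Nat) :
    ∀ f ∈ pvColF l j, f ≠ "" := by
  intro f hf
  obtain ⟨row, _, hr⟩ := List.mem_filterMap.mp hf
  exact frag_ne_empty hr

theorem str_eq_empty_iff (s : String) : s = "" ↔ s.toList = [] := by
  constructor
  · rintro rfl; rfl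
  · intro h
    apply String.toList_inj.mp
    rw [h]; rfl

theorem join_eq_empty_iff (fs : List String) (hb : ∀ f ∈ fs, f ≠ "") :
    PySem.Str.join "\n" fs = "" ↔ fs = [] := by
  cases fs with
  | nil => simp [join_nil_str]
  | cons a t =>
    simp only [iff_false, reduceCtorEq]
    intro h
    rw [str_eq_empty_iff] at h
    have ha : a.toList ≠ [] := by
      have := hb a (by simp)
      intro hc
      exact this (String.toList_inj.mp (by rw [hc]; rfl))
    cases t with
    | nil =>
      rw [PySem.Str.toList_join] at h
      simp only [List.map_cons, List.map_nil, PySem.Chars.join_singleton] at h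
      exact ha h
    | cons b t' =>
      rw [PySem.Str.toList_join] at h
      simp only [List.map_cons, PySem.Chars.join_cons_cons] at h
      rcases List.append_eq_nil_iff.mp h with ⟨h1, -⟩
      rcases List.append_eq_nil_iff.mp h1 with ⟨h2, -⟩
      exact ha h2

theorem chars_join_snoc (l : List (List Char)) (x : List Char) :
    PySem.Chars.join ['\n'] (l ++ [x]) =
      if l = [] then x else PySem.Chars.join ['\n'] l ++ ['\n'] ++ x := by
  induction l with
  | nil => simp [PySem.Chars.join_singleton]
  | cons a t ih =>
    rw [if_neg (by simp)]
    cases t with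
    | nil => simp [PySem.Chars.join_cons_cons, PySem.Chars.join_singleton]
    | cons b t' =>
      rw [List.cons_append, List.cons_append, PySem.Chars.join_cons_cons]
      rw [← List.cons_append, ih, if_neg (by simp), PySem.Chars.join_cons_cons]
      simp [List.append_assoc]

theorem join_snoc (fs : List String) (f : String) :
    PySem.Str.join "\n" (fs ++ [f]) =
      if fs = [] then f else PySem.Str.join "\n" fs ++ "\n" ++ f := by
  apply String.toList_inj.mp
  rw [PySem.Str.toList_join, List.map_append]
  have hn : "\n".toList = ['\n'] := rfl
  rw [hn]
  simp only [List.map_cons, List.map_nil]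
  rw [chars_join_snoc]
  by_cases h : fs = []
  · subst h; simp
  · rw [if_neg (by simpa using h), if_neg h,
      String.toList_append, String.toList_append, PySem.Str.toList_join, hn]

theorem getD_map_range {α : Type} (W k : Nat) (f : Nat → α) (d : α) (h : k < W) :
    ((List.range W).map f).getD k d = f k := by
  rw [List.getD_eq_getElem _ d (by simpa using h)]
  simp

theorem set_map_range {α : Type} (W k : Nat) (f : Nat → α) (v : α) (h : k < W) :
    ((List.range W).map f).set k v = (List.range W).map (fun j => if j = k then v else f j) := by
  apply List.ext_getElem?
  intro j
  by_cases hj : j < W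
  · by_cases hk : k = j
    · subst hk
      simp [hj]
    · simp [hk, List.getElem?_range hj]
      exact fun hc => absurd hc.symm hk
  · have hn : (List.range W).length ≤ j := by simpa using hj
    simp [List.getElem?_eq_none hn, show ¬ k = j from fun hc => hj (hc ▸ h)]

theorem fragAt_none_of_le (j : Nat) (row : List String) (h : row.length ≤ j) :
    pvFragAt j row = none := by
  unfold pvFragAt
  rw [List.getElem?_eq_none h]

theorem fragAt_append_ne (j : Nat) (xs : List String) (x : String) (h : j ≠ xs.length) :
    pvFragAt j (xs ++ [x]) = pvFragAt j xs := by
  unfold pvFragAt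
  by_cases hj : j < xs.length
  · rw [List.getElem?_append_left hj]
  · have h1 : (xs ++ [x]).length ≤ j := by simp; omega
    have h2 : xs.length ≤ j := by omega
    rw [List.getElem?_eq_none h1, List.getElem?_eq_none h2]

theorem fragAt_append_self (xs : List String) (x : String) :
    pvFragAt xs.length (xs ++ [x]) =
      if PySem.Str.strip x != "" then some (PySem.Str.strip x) else none := by
  unfold pvFragAt
  rw [List.getElem?_append_right (by omega)]
  simp

theorem inner_fold (base : Nat → List String) (hb : ∀ j f, f ∈ base j → f ≠ "")
    (xs : List String) (W : Nat) (hx : xs.length ≤ W) (c : Nat) :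
    (PySem.List.enumerate xs 0).foldl pvCellStep
        ((List.range W).map (fun j => PySem.Str.join "\n" (base j)), c)
      = ((List.range W).map (fun j => PySem.Str.join "\n" (base j ++ (pvFragAt j xs).toList)),
         c + (xs.filter (fun s => PySem.Str.strip s != "")).length) := by
  induction xs using List.reverseRecOn with
  | nil =>
    simp only [PySem.List.enumerate_nil, List.foldl_nil, List.filter_nil, List.length_nil,
      Nat.add_zero]
    congr 1
    apply List.map_congr_left
    intro j _
    rw [fragAt_none_of_le j [] (by simp)]
    simp
  | append_singleton ys x ih =>
    have hys : ys.length ≤ W := by simp at hx; omega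
    have hlt : ys.length < W := by simp at hx; omega
    rw [PySem.List.enumerate_append, List.foldl_append, ih hys]
    have hset : ∀ v, ((List.range W).map
          (fun j => PySem.Str.join "\n" (base j ++ (pvFragAt j ys).toList))).set ys.length v
        = (List.range W).map (fun j => if j = ys.length then v
            else PySem.Str.join "\n" (base j ++ (pvFragAt j ys).toList)) :=
      fun v => set_map_range W ys.length _ v hlt
    have hget : ((List.range W).map
          (fun j => PySem.Str.join "\n" (base j ++ (pvFragAt j ys).toList))).getD ys.length ""
        = PySem.Str.join "\n" (base ys.length) := by
      rw [getD_map_range W ys.length _ "" hlt, fragAt_none_of_le ys.length ys (le_refl _)]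
      simp
    simp only [PySem.List.enumerate_cons, PySem.List.enumerate_nil, List.foldl_cons,
      List.foldl_nil, pvCellStep, Int.zero_add]
    by_cases hs : PySem.Str.strip x != ""
    · rw [if_pos hs]
      simp only [Int.toNat_natCast, hget, hset]
      rw [Prod.mk.injEq]
      refine ⟨?_, ?_⟩
      · apply List.map_congr_left
        intro j _
        by_cases hj : j = ys.length
        · rw [if_pos hj, hj, fragAt_append_self, if_pos hs]
          rw [Option.toList_some, join_snoc]
          by_cases hbase : base ys.length = []
          · rw [if_pos hbase, hbase, join_nil_str]
            rw [if_neg (by simp)]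
          · rw [if_neg hbase]
            rw [if_pos (by
              simp only [bne_iff_ne, ne_eq]
              rw [join_eq_empty_iff _ (fun f hf => hb ys.length f hf)]
              exact hbase)]
        · rw [if_neg hj, fragAt_append_ne j ys x hj]
      · rw [List.filter_append]
        simp [hs]
        omega
    · rw [if_neg hs]
      rw [Prod.mk.injEq]
      refine ⟨?_, ?_⟩
      · apply List.map_congr_left
        intro j _
        by_cases hj : j = ys.length
        · rw [hj, fragAt_append_self, if_neg hs, fragAt_none_of_le ys.length ys (le_refl _)]
        · rw [fragAt_append_ne j ys x hj]
      · rw [List.filter_append]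
        simp [hs]

theorem width_bound (l : List (List String)) (r : List String) (h : r ∈ l) :
    r.length ≤ pvW l :=
  (PySem.List.le_foldl_max (l.map List.length) 0).2 r.length (List.mem_map_of_mem h)

theorem colF_empty_of_ge (l : List (List String)) (j : Nat) (h : pvW l ≤ j) :
    pvColF l j = [] := by
  unfold pvColF
  rw [List.filterMap_eq_nil_iff]
  intro r hr
  exact fragAt_none_of_le j r (le_trans (width_bound l r hr) h)

theorem fold_state (l : List (List String)) :
    l.foldl pvRowStep (([] : List String), (0 : Nat))
      = ((List.range (pvW l)).map (fun j => PySem.Str.join "\n" (pvColF l j)), pvS l) := by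
  induction l using List.reverseRecOn with
  | nil => rfl
  | append_singleton t row ih =>
    rw [List.foldl_append, List.foldl_cons, List.foldl_nil, ih]
    have hW : pvW (t ++ [row]) = max (pvW t) row.length := by
      unfold pvW
      rw [List.map_append, List.foldl_append]
      simp
    have hcol : ∀ j, pvColF (t ++ [row]) j = pvColF t j ++ (pvFragAt j row).toList := by
      intro j
      unfold pvColF
      rw [List.filterMap_append]
      cases h : pvFragAt j row <;> simp [h]
    have hS : pvS (t ++ [row]) =
        if (row.filter (fun c => PySem.Str.strip c != "")).length ≤ 1
        then pvS t + 1 else pvS t := by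
      unfold pvS
      rw [List.filter_append, List.length_append]
      by_cases hp : (row.filter (fun c => PySem.Str.strip c != "")).length ≤ 1
      · simp [hp]
      · simp [hp]
    have hacc : (if row.length > ((List.range (pvW t)).map
            (fun j => PySem.Str.join "\n" (pvColF t j))).length then
          ((List.range (pvW t)).map (fun j => PySem.Str.join "\n" (pvColF t j)))
            ++ List.replicate (row.length - ((List.range (pvW t)).map
                (fun j => PySem.Str.join "\n" (pvColF t j))).length) ""
        else ((List.range (pvW t)).map (fun j => PySem.Str.join "\n" (pvColF t j))))
        = (List.range (max (pvW t) row.length)).map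
            (fun j => PySem.Str.join "\n" (pvColF t j)) := by
      simp only [List.length_map, List.length_range]
      by_cases hgt : row.length > pvW t
      · rw [if_pos hgt]
        have hW2 : max (pvW t) row.length = pvW t + (row.length - pvW t) := by omega
        rw [hW2, List.range_add, List.map_append, List.map_map]
        congr 1
        have hconst : ((fun j => PySem.Str.join "\n" (pvColF t j)) ∘ (fun i => pvW t + i))
            = fun _ => "" := by
          funext i
          simp only [Function.comp]
          rw [colF_empty_of_ge t _ (Nat.le_add_right _ _), join_nil_str]
        rw [hconst, List.map_const']
        simp
      · rw [if_neg hgt]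
        have hm : max (pvW t) row.length = pvW t := by omega
        rw [hm]
    simp only [pvRowStep]
    rw [hacc, inner_fold (pvColF t) (fun j f hf => colF_ne_empty t j f hf) row
          (max (pvW t) row.length) (le_max_right _ _) 0]
    rw [Prod.mk.injEq]
    refine ⟨?_, ?_⟩
    · rw [hW]
      apply List.map_congr_left
      intro j _
      rw [hcol j]
    · rw [hS, Nat.zero_add]

theorem st_empty_iff (matrix : List (List String)) :
    ((List.range (pvW matrix)).map (fun j => PySem.Str.join "\n" (pvColF matrix j)) = [])
      ↔ pvW matrix = 0 := by
  constructor
  · intro h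
    have := congrArg List.length h
    simpa using this
  · intro h
    rw [h]
    rfl

theorem filled_eq (matrix : List (List String)) (W : Nat) :
    (((List.range W).map (pvColF matrix)).filter (fun col => col != [])).length
      = (((List.range W).map (fun j => PySem.Str.join "\n" (pvColF matrix j))).filter
          (fun s => s != "")).length := by
  rw [List.filter_map, List.filter_map, List.length_map, List.length_map]
  congr 1
  apply List.filter_congr
  intro j _
  simp only [Function.comp_apply]
  by_cases h : pvColF matrix j = []
  · simp [h, join_nil_str]
  · have hne : ¬ PySem.Str.join "\n" (pvColF matrix j) = "" := by
      rw [join_eq_empty_iff _ (colF_ne_empty matrix j)]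
      exact h
    have h1 : (pvColF matrix j != []) = true := by simpa using h
    have h2 : (PySem.Str.join "\n" (pvColF matrix j) != "") = true := by simpa using hne
    rw [h1, h2]

theorem collapsed_eq (matrix : List (List String)) (W : Nat) :
    ((List.range W).map (pvColF matrix)).map
        (fun col => if col != [] then PySem.Str.join "\n" col else "")
      = (List.range W).map (fun j => PySem.Str.join "\n" (pvColF matrix j)) := by
  rw [List.map_map]
  apply List.map_congr_left
  intro j _
  simp only [Function.comp]
  by_cases h : pvColF matrix j = []
  · simp [h, join_nil_str]
  · simp [h]

theorem main_eq (matrix : List (List String)) :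
    collapse_matrix_to_single_row matrix = collapse_matrix_to_single_row_alt matrix := by
  cases matrix with
  | nil => rfl
  | cons x t =>
    simp only [collapse_matrix_to_single_row, collapse_matrix_to_single_row_alt]
    have hne : (x :: t : List (List String)) ≠ [] := by simp
    rw [if_neg hne, if_neg hne]
    rw [max_cols_eq, fold_state, sparse_eq, chunks_eq]
    by_cases h0 : pvW (x :: t) = 0
    · rw [if_pos h0, if_pos ((st_empty_iff (x :: t)).mpr h0)]
    rw [if_neg h0, if_neg (fun hc => h0 ((st_empty_iff (x :: t)).mp hc))]
    by_cases hg : (x :: t : List (List String)).length < 4 ∨ pvS (x :: t) < 2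
    · rw [if_pos hg, if_pos hg]
    rw [if_neg hg, if_neg hg]
    rw [filled_eq]
    by_cases hc2 : (((List.range (pvW (x :: t))).map
        (fun j => PySem.Str.join "\n" (pvColF (x :: t) j))).filter
          (fun s => s != "")).length < 2
    · rw [if_pos hc2, if_pos hc2]
    rw [if_neg hc2, if_neg hc2]
    rw [collapsed_eq]

-- ===== VERDICT (by name: the statement is the Claim_ definition above) =====
theorem collapse_matrix_to_single_row_spec : Claim_equal_collapse_matrix_to_single_row := by
  intro matrix _
  unfold Spec_collapse_matrix_to_single_row
  exact main_eq matrix
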